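-- pv_equiv track=rewrite | github.com/mosaicml/streaming | benchmarks/backends/write.py | _splits_by_size
-- ===== SOURCE A (Python) =====
-- from collections import defaultdict
-- from typing import Dict, Iterable, List, Optional, Tuple
--
-- def _splits_by_size(dataset: Dict[str, Tuple[List[int], List[str]]]) -> Iterable[str]:
--     """Order a dataset's splits by their size in samples, then by name.
--
--     Argxs:
--         dataset (Dict[str, Tuple[List[int], List[str]]]): Mapping of split name to split data.
--
--     Returns:
--         Iterable[str]: Ordered split names.
--     """
--     size2splits = defaultdict(list)
--     for split, (nums, _) in dataset.items():
--         size2splits[len(nums)].append(split)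
--
--     splits_by_size = []
--     for size in sorted(size2splits):
--         for split in sorted(size2splits[size]):
--             splits_by_size.append(split)
--
--     return splits_by_size
-- ===== SOURCE B (Python) =====
-- def _splits_by_size(dataset):
--     """Order a dataset's splits by their size in samples, then by name."""
--     return [split for split, _ in
--             sorted(dataset.items(), key=lambda item: (len(item[1][0]), item[0]))]
-- ===== Notes on version B (the rewrite author's own statement) =====
-- stated objective: simpler
-- what changed: Replaces the defaultdict size-bucketing plus nested loop over sorted sizes and sorted bucket contents with a single stable sort of the dict items by the tuple key (sample count, name).
import Mathlib
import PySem

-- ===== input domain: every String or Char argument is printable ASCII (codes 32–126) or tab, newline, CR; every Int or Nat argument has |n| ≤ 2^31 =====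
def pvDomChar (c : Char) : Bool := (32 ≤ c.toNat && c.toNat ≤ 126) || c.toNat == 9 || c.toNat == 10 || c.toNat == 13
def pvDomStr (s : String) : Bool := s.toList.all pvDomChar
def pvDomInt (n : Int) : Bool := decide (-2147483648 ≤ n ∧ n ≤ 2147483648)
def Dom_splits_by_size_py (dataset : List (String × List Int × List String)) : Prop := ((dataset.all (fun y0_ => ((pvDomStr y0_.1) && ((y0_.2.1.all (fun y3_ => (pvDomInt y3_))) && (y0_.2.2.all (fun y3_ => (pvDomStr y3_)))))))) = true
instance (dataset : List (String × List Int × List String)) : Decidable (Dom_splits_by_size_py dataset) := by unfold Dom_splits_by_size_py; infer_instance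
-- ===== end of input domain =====

-- B replaces A's defaultdict size-bucketing + nested loops by one stable sort of the
-- items by the tuple key (sample count, name); objective: simpler.

-- ===== PORT A =====
def splits_by_size_py (dataset : List (String × List Int × List String)) : List String :=
  -- size2splits = defaultdict(list); for split, (nums, _) in dataset.items(): size2splits[len(nums)].append(split)
  let size2splits : PySem.Dict Int (List String) :=
    dataset.foldl (fun d e => d.modify ((e.2.1.length : Int)) [] (fun cur => cur ++ [e.1]))
      PySem.Dict.empty
  -- for size in sorted(size2splits): for split in sorted(size2splits[size]): splits_by_size.append(split)
  (PySem.List.sorted size2splits.keys (fun x => x)).foldl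
    (fun acc size =>
      (PySem.List.sorted (size2splits.getD size []) (fun x => x)).foldl
        (fun acc2 split => acc2 ++ [split]) acc) []

-- ===== PORT B =====
def splits_by_size_py_alt (dataset : List (String × List Int × List String)) : List String :=
  -- [split for split, _ in sorted(dataset.items(), key=lambda item: (len(item[1][0]), item[0]))]
  (PySem.List.sorted2 dataset (fun e => (e.2.1.length : Int)) (fun e => e.1)).map (fun e => e.1)

-- ===== PRECONDITION & SPEC =====
def Spec_splits_by_size_py (dataset : List (String × List Int × List String)) (out : List String) : Prop := out = splits_by_size_py_alt dataset
instance (dataset : List (String × List Int × List String)) (out : List String) : Decidable (Spec_splits_by_size_py dataset out) := by unfold Spec_splits_by_size_py; infer_instance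

-- ===== CLAIM (what is proved, stated in full; the proofs are below) =====
def Claim_equal_splits_by_size_py : Prop := ∀ (dataset : List (String × List Int × List String)), Dom_splits_by_size_py dataset → Spec_splits_by_size_py dataset (splits_by_size_py dataset)

-- ===== LEMMAS AND PROOFS =====

-- insertBy skips a prefix it never inserts before
theorem pv_insertBy_skip {α : Type} (bf : α → α → Bool) (x : α) (l₁ l₂ : List α)
    (h : ∀ y ∈ l₁, bf x y = false) :
    PySem.List.insertBy bf x (l₁ ++ l₂) = l₁ ++ PySem.List.insertBy bf x l₂ := by
  induction l₁ with
  | nil => simp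
  | cons z zs ih =>
      simp only [List.cons_append, PySem.List.insertBy]
      rw [h z (by simp)]
      simp [ih (fun y hy => h y (by simp [hy]))]

-- insertBy lands before a suffix it always inserts before
theorem pv_insertBy_all {α : Type} (bf : α → α → Bool) (x : α) (l₁ l₂ : List α)
    (h : ∀ y ∈ l₂, bf x y = true) :
    PySem.List.insertBy bf x (l₁ ++ l₂) = PySem.List.insertBy bf x l₁ ++ l₂ := by
  induction l₁ with
  | nil =>
      cases l₂ with
      | nil => simp
      | cons y ys =>
          simp only [List.nil_append, PySem.List.insertBy]
          rw [h y (by simp)]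
          simp
  | cons z zs ih =>
      simp only [List.cons_append, PySem.List.insertBy]
      cases hz : bf x z <;> simp [ih]

theorem pv_insertBy_congr {α : Type} (bf bf' : α → α → Bool) (x : α) (l : List α)
    (h : ∀ y ∈ l, bf x y = bf' x y) :
    PySem.List.insertBy bf x l = PySem.List.insertBy bf' x l := by
  induction l with
  | nil => rfl
  | cons z zs ih =>
      simp only [PySem.List.insertBy]
      rw [h z (by simp), ih (fun y hy => h y (by simp [hy]))]

theorem pv_map_insertBy {α β : Type} (bf : α → α → Bool) (bf' : β → β → Bool) (f : α → β)
    (x : α) (l : List α) (h : ∀ a b : α, bf' (f a) (f b) = bf a b) :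
    (PySem.List.insertBy bf x l).map f = PySem.List.insertBy bf' (f x) (l.map f) := by
  induction l with
  | nil => rfl
  | cons z zs ih =>
      simp only [PySem.List.insertBy, List.map_cons]
      rw [h x z]
      cases hz : bf x z <;> simp [ih]

theorem pv_sorted_snoc {α κ : Type} [LT κ] [DecidableLT κ] (l : List α) (a : α) (key : α → κ) :
    PySem.List.sorted (l ++ [a]) key =
      PySem.List.insertBy (fun u v => decide (key u < key v)) a (PySem.List.sorted l key) := by
  rw [PySem.List.sorted_eq_foldl_insertBy, PySem.List.sorted_eq_foldl_insertBy, List.foldl_append]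
  rfl

theorem pv_sorted2_snoc {α : Type} (l : List α) (a : α) (k1 : α → Int) (k2 : α → String) :
    PySem.List.sorted2 (l ++ [a]) k1 k2 =
      PySem.List.insertBy
        (fun u v => decide (k1 u < k1 v) || (!decide (k1 v < k1 u) && decide (k2 u < k2 v)))
        a (PySem.List.sorted2 l k1 k2) := by
  simp only [PySem.List.sorted2, List.foldl_append, List.foldl_cons, List.foldl_nil]
  rfl

theorem pv_sorted_map {α κ : Type} [LT κ] [DecidableLT κ] (l : List α) (f : α → κ) :
    PySem.List.sorted (l.map f) (fun x => x) = (PySem.List.sorted l f).map f := by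
  induction l using List.reverseRecOn with
  | nil => rfl
  | append_singleton l a ih =>
      rw [List.map_append, List.map_singleton, pv_sorted_snoc, pv_sorted_snoc, ih,
        pv_map_insertBy (fun u v => decide (f u < f v)) (fun u v => decide (u < v)) f a
          (PySem.List.sorted l f) (fun _ _ => rfl)]

theorem pv_insertBy_sorted_split {κ : Type} [LinearOrder κ] (l : List κ) (x : κ)
    (hp : l.Pairwise (· < ·)) (hx : x ∉ l) :
    ∃ P Q, l = P ++ Q ∧
      PySem.List.insertBy (fun u v => decide (u < v)) x l = P ++ x :: Q ∧
      (∀ u ∈ P, u < x) ∧ (∀ u ∈ Q, x < u) := by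
  induction l with
  | nil => exact ⟨[], [], rfl, rfl, by simp, by simp⟩
  | cons y ys ih =>
      rcases List.pairwise_cons.mp hp with ⟨hy, hys⟩
      by_cases hxy : x < y
      · refine ⟨[], y :: ys, rfl, ?_, by simp, ?_⟩
        · simp [PySem.List.insertBy, hxy]
        · intro u hu
          rcases List.mem_cons.mp hu with rfl | hu
          · exact hxy
          · exact hxy.trans (hy u hu)
      · have hyx : y < x := by
          rcases lt_trichotomy x y with h | h | h
          · exact absurd h hxy
          · exact absurd (h ▸ List.mem_cons_self) hx
          · exact h
        rcases ih hys (fun h => hx (List.mem_cons_of_mem _ h)) with ⟨P, Q, h1, h2, h3, h4⟩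
        refine ⟨y :: P, Q, by simp [h1], ?_, ?_, h4⟩
        · simp [PySem.List.insertBy, hxy, h2]
        · intro u hu
          rcases List.mem_cons.mp hu with rfl | hu
          · exact hyx
          · exact h3 u hu

theorem pv_insertBy_all' {α : Type} (bf : α → α → Bool) (x : α) (l : List α)
    (h : ∀ y ∈ l, bf x y = true) :
    PySem.List.insertBy bf x l = x :: l := by
  simpa using pv_insertBy_all bf x [] l h

theorem pv_k1_of_mem_group {α : Type} (xs : List α) (k1 : α → Int) (k2 : α → String)
    (u : Int) (y : α) (hy : y ∈ PySem.List.sorted (xs.filter (fun e => k1 e == u)) k2) :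
    k1 y = u := by
  have := (PySem.List.mem_sorted _ _ _ _).mp hy
  simpa using (List.mem_filter.mp this).2

theorem pv_filter_P {α : Type} (xs : List α) (a : α) (k1 : α → Int) (k2 : α → String)
    (P : List Int) (hPlt : ∀ u ∈ P, u < k1 a) :
    P.flatMap (fun u => PySem.List.sorted ((xs ++ [a]).filter (fun e => k1 e == u)) k2)
      = P.flatMap (fun u => PySem.List.sorted (xs.filter (fun e => k1 e == u)) k2) := by
  refine List.flatMap_congr (fun u hu => ?_)
  have : (k1 a == u) = false := by
    have := hPlt u hu
    simp only [beq_eq_false_iff_ne, ne_eq]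
    omega
  simp [List.filter_append, this]

theorem pv_filter_Q {α : Type} (xs : List α) (a : α) (k1 : α → Int) (k2 : α → String)
    (Q : List Int) (hQgt : ∀ u ∈ Q, k1 a < u) :
    Q.flatMap (fun u => PySem.List.sorted ((xs ++ [a]).filter (fun e => k1 e == u)) k2)
      = Q.flatMap (fun u => PySem.List.sorted (xs.filter (fun e => k1 e == u)) k2) := by
  refine List.flatMap_congr (fun u hu => ?_)
  have : (k1 a == u) = false := by
    have := hQgt u hu
    simp only [beq_eq_false_iff_ne, ne_eq]
    omega
  simp [List.filter_append, this]

theorem pv_false_on_P {α : Type} (xs : List α) (a : α) (k1 : α → Int) (k2 : α → String)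
    (P : List Int) (hPlt : ∀ u ∈ P, u < k1 a) :
    ∀ y ∈ P.flatMap (fun u => PySem.List.sorted (xs.filter (fun e => k1 e == u)) k2),
      (decide (k1 a < k1 y) || (!decide (k1 y < k1 a) && decide (k2 a < k2 y))) = false := by
  intro y hy
  obtain ⟨u, hu, hyu⟩ := List.mem_flatMap.mp hy
  have h1 : k1 y = u := pv_k1_of_mem_group xs k1 k2 u y hyu
  have h2 : k1 y < k1 a := h1 ▸ hPlt u hu
  simp [h2, show ¬ k1 a < k1 y by omega]

theorem pv_true_on_Q {α : Type} (xs : List α) (a : α) (k1 : α → Int) (k2 : α → String)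
    (Q : List Int) (hQgt : ∀ u ∈ Q, k1 a < u) :
    ∀ y ∈ Q.flatMap (fun u => PySem.List.sorted (xs.filter (fun e => k1 e == u)) k2),
      (decide (k1 a < k1 y) || (!decide (k1 y < k1 a) && decide (k2 a < k2 y))) = true := by
  intro y hy
  obtain ⟨u, hu, hyu⟩ := List.mem_flatMap.mp hy
  have h1 : k1 y = u := pv_k1_of_mem_group xs k1 k2 u y hyu
  have h2 : k1 a < k1 y := h1 ▸ hQgt u hu
  simp [h2]

theorem pv_congr_on_G {α : Type} (xs : List α) (a : α) (k1 : α → Int) (k2 : α → String) :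
    ∀ y ∈ PySem.List.sorted (xs.filter (fun e => k1 e == k1 a)) k2,
      (decide (k1 a < k1 y) || (!decide (k1 y < k1 a) && decide (k2 a < k2 y)))
        = decide (k2 a < k2 y) := by
  intro y hy
  have h1 : k1 y = k1 a := pv_k1_of_mem_group xs k1 k2 (k1 a) y hy
  simp [h1]

-- the main structural fact: a single stable sort by the lexicographic key (k1, k2)
-- equals grouping by k1, walking the distinct k1-values in order, each group sorted by k2
theorem pv_main {α : Type} (xs : List α) (k1 : α → Int) (k2 : α → String) :
    PySem.List.sorted2 xs k1 k2 =
      (PySem.List.sorted (PySem.Set.ofList (xs.map k1)) (fun v => v)).flatMap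
        (fun v => PySem.List.sorted (xs.filter (fun e => k1 e == v)) k2) := by
  induction xs using List.reverseRecOn with
  | nil => rfl
  | append_singleton xs a ih =>
      have hofl : PySem.Set.ofList ((xs ++ [a]).map k1)
          = PySem.Set.add (PySem.Set.ofList (xs.map k1)) (k1 a) := by
        rw [List.map_append, List.map_singleton, PySem.Set.ofList_eq_foldl,
          PySem.Set.ofList_eq_foldl, List.foldl_append]
        rfl
      rw [pv_sorted2_snoc, ih, hofl]
      by_cases hv : k1 a ∈ xs.map k1
      · -- the size k1 a was already present: the sorted distinct-size list is unchanged
        rw [show PySem.Set.add (PySem.Set.ofList (xs.map k1)) (k1 a)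
              = PySem.Set.ofList (xs.map k1) by
            simp [PySem.Set.add, PySem.Set.contains, PySem.Set.mem_ofList, hv]]
        have hmem : k1 a ∈ PySem.List.sorted (PySem.Set.ofList (xs.map k1)) (fun v => v) :=
          (PySem.List.mem_sorted _ _ _ _).mpr ((PySem.Set.mem_ofList _ _).mpr hv)
        obtain ⟨P, Q, hPQ⟩ := List.append_of_mem hmem
        have hpw := PySem.List.sorted_ofList_pairwise_lt (xs.map k1)
        rw [hPQ] at hpw
        rcases List.pairwise_append.mp hpw with ⟨_, hpwQ, hcross⟩
        have hPlt : ∀ u ∈ P, u < k1 a := fun u hu => hcross u hu (k1 a) List.mem_cons_self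
        have hQgt : ∀ u ∈ Q, k1 a < u := (List.pairwise_cons.mp hpwQ).1
        rw [hPQ, List.flatMap_append, List.flatMap_append, List.flatMap_cons, List.flatMap_cons]
        rw [pv_filter_P xs a k1 k2 P hPlt, pv_filter_Q xs a k1 k2 Q hQgt]
        rw [show (xs ++ [a]).filter (fun e => k1 e == k1 a)
              = xs.filter (fun e => k1 e == k1 a) ++ [a] by simp [List.filter_append]]
        rw [pv_sorted_snoc]
        rw [pv_insertBy_skip _ a _ _ (pv_false_on_P xs a k1 k2 P hPlt),
          pv_insertBy_all _ a _ _ (pv_true_on_Q xs a k1 k2 Q hQgt),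
          pv_insertBy_congr _ (fun u w => decide (k2 u < k2 w)) a _
            (pv_congr_on_G xs a k1 k2)]
      · -- fresh size: it is inserted among the sorted distinct sizes, with the single item [a]
        rw [show PySem.Set.add (PySem.Set.ofList (xs.map k1)) (k1 a)
              = PySem.Set.ofList (xs.map k1) ++ [k1 a] by
            simp [PySem.Set.add, PySem.Set.contains, PySem.Set.mem_ofList, hv]]
        rw [pv_sorted_snoc]
        have hnot : k1 a ∉ PySem.List.sorted (PySem.Set.ofList (xs.map k1)) (fun v => v) := by
          rw [PySem.List.mem_sorted, PySem.Set.mem_ofList]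
          exact hv
        obtain ⟨P, Q, hPQ, hins, hPlt, hQgt⟩ :=
          pv_insertBy_sorted_split _ (k1 a) (PySem.List.sorted_ofList_pairwise_lt (xs.map k1)) hnot
        rw [hins, hPQ, List.flatMap_append, List.flatMap_append, List.flatMap_cons]
        rw [pv_filter_P xs a k1 k2 P hPlt, pv_filter_Q xs a k1 k2 Q hQgt]
        have hnil : xs.filter (fun e => k1 e == k1 a) = [] := by
          refine List.filter_eq_nil_iff.mpr (fun e he h => hv ?_)
          have : k1 e = k1 a := by simpa using h
          exact this ▸ List.mem_map_of_mem he
        rw [show (xs ++ [a]).filter (fun e => k1 e == k1 a) = [a] by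
            simp [List.filter_append, hnil]]
        rw [show PySem.List.sorted [a] k2 = [a] from rfl]
        rw [pv_insertBy_skip _ a _ _ (pv_false_on_P xs a k1 k2 P hPlt),
          pv_insertBy_all' _ a _ (pv_true_on_Q xs a k1 k2 Q hQgt)]
        simp

-- ===== VERDICT (by name: the statement is the Claim_ definition above) =====
theorem splits_by_size_py_spec : Claim_equal_splits_by_size_py := by
  intro dataset _
  unfold Spec_splits_by_size_py splits_by_size_py splits_by_size_py_alt
  simp only []
  have hpair :
      List.foldl (fun (d : PySem.Dict Int (List String)) (e : String × List Int × List String) =>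
          d.modify (e.2.1.length : Int) [] fun cur => cur ++ [e.1]) PySem.Dict.empty dataset
        = List.foldl (fun (d : PySem.Dict Int (List String)) (p : Int × String) =>
            d.modify p.1 [] fun cur => cur ++ [p.2]) PySem.Dict.empty
            (dataset.map (fun e => ((e.2.1.length : Int), e.1))) := by
    rw [List.foldl_map]
  rw [hpair]
  have hkeys :
      (List.foldl (fun (d : PySem.Dict Int (List String)) (p : Int × String) =>
            d.modify p.1 [] fun cur => cur ++ [p.2]) PySem.Dict.empty
            (dataset.map (fun e => ((e.2.1.length : Int), e.1)))).keys
        = PySem.Set.ofList (dataset.map (fun e => ((e.2.1.length : Int)))) := by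
    rw [PySem.Dict.keys_foldl_modify_key]
    simp only [PySem.Dict.keys_empty, List.map_map]
    rfl
  rw [hkeys]
  simp only [PySem.Dict.getD_foldl_modify_append, PySem.Dict.getD_empty, List.nil_append,
    List.filter_map, List.map_map, PySem.List.foldl_append_singleton_eq_self]
  rw [PySem.List.foldl_append_eq_flatMap]
  simp only [List.nil_append, Function.comp_def]
  simp only [pv_sorted_map]
  rw [← List.map_flatMap]
  exact congrArg _ (pv_main dataset (fun e => ((e.2.1.length : Int))) (fun e => e.1)).symm
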